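-- pv_equiv track=rewrite | github.com/Olavo15/Target-Sistemas | 2.py | check_fibonacci_numbers
-- ===== SOURCE A (Python) =====
-- def fibonacci_sequence(limit):
--     sequence = [0, 1]
--     while sequence[-1] < limit:
--         sequence.append(sequence[-1] + sequence[-2])
--     return sequence
--
-- def is_fibonacci_number(number):
--
--     if number < 0:
--         return False
--     sequence = fibonacci_sequence(number + 1)
--     return number in sequence
--
-- def check_fibonacci_numbers(numbers):
--
--     results = []
--     for number in numbers:
--         if is_fibonacci_number(number):
--             results.append(f"O número {number} pertence à sequência de Fibonacci.")
--         else: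
--             results.append(f"O número {number} **não** pertence à sequência de Fibonacci.")
--     return results
-- ===== SOURCE B (Python) =====
-- def check_fibonacci_numbers(numbers):
--     if not numbers:
--         return []
--     m = max(numbers)
--     fibs = {0}
--     a, b = 1, 1
--     while a <= m:
--         fibs.add(a)
--         a, b = b, a + b
--     return [
--         f"O número {n} pertence à sequência de Fibonacci." if n in fibs
--         else f"O número {n} **não** pertence à sequência de Fibonacci."
--         for n in numbers
--     ]
-- ===== Notes on version B (the rewrite author's own statement) =====
-- stated objective: faster
-- what changed: B computes max(numbers) once, builds the set of Fibonacci numbers up to that maximum in a single pass, and labels each element by set membership, instead of regenerating and scanning a whole Fibonacci list for every element as A does.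
import Mathlib
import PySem

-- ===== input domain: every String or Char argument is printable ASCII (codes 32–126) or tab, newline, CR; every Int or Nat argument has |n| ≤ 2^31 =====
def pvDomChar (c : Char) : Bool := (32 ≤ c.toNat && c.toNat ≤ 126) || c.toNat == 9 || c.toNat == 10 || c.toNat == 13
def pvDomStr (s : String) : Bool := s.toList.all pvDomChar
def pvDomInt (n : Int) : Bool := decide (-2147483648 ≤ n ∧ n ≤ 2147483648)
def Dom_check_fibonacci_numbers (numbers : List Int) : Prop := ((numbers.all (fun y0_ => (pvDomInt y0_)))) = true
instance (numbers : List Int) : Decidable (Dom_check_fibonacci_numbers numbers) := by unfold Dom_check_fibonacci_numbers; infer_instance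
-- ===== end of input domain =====

-- B builds the Fibonacci set up to max(numbers) once instead of regenerating a list per element (objective: faster, constant-factor).

-- the two Portuguese labels (f-strings of both programs; str(n) = PySem.Int.toStr)
def pvYes (n : Int) : String := "O número " ++ PySem.Int.toStr n ++ " pertence à sequência de Fibonacci."
def pvNo (n : Int) : String := "O número " ++ PySem.Int.toStr n ++ " **não** pertence à sequência de Fibonacci."

-- ===== PORT A =====
-- while-loop of fibonacci_sequence, state = last two elements (a,b); the '0 < a' conjunct
-- only makes the recursion total (it holds at every actual call) and never changes the value.
def pvFibGo (a b : Nat) (limit : Int) (acc : List Int) : List Int :=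
  if h : 0 < a ∧ (b : Int) < limit then
    pvFibGo b (a + b) limit (acc ++ [((a + b : Nat) : Int)])
  else acc
termination_by limit.toNat - b
decreasing_by
  obtain ⟨ha, hb⟩ := h
  have : (b : Int) < (limit.toNat : Int) := by
    rcases Int.le_total limit 0 with h' | h'
    · omega
    · rwa [Int.toNat_of_nonneg h']
  omega

def fibonacci_sequence (limit : Int) : List Int :=
  -- sequence = [0, 1]; the first loop iteration (when it runs) appends 0+1=1, then loops from (1,1)
  if 1 < limit then pvFibGo 1 1 limit [0, 1, 1] else [0, 1]

def is_fibonacci_number (number : Int) : Bool :=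
  if number < 0 then false
  else (fibonacci_sequence (number + 1)).contains number

def check_fibonacci_numbers (numbers : List Int) : List String :=
  numbers.foldl
    (fun results number =>
      results ++ [if is_fibonacci_number number then pvYes number else pvNo number])
    []

-- ===== PORT B =====
-- while-loop of B: fibs.add(a); a,b = b,a+b while a <= m; the '0 < a ∧ a ≤ b' conjuncts
-- only make the recursion total (they hold at every actual call) and never change the value.
def pvSetGo (a b : Nat) (m : Int) (fibs : PySem.Set Int) : PySem.Set Int :=
  if h : 0 < a ∧ a ≤ b ∧ (a : Int) ≤ m then
    pvSetGo b (a + b) m (PySem.Set.add fibs (a : Int))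
  else fibs
termination_by (m.toNat + 1 - a) * 2 + (if a = b then 1 else 0)
decreasing_by
  obtain ⟨ha, hab, ham⟩ := h
  have ham' : a ≤ m.toNat := by
    rcases Int.le_total m 0 with h' | h'
    · omega
    · have := Int.toNat_of_nonneg h'; omega
  rcases Nat.lt_or_eq_of_le hab with hlt | heq
  · have h1 : (if b = a + b then 1 else 0) ≤ 1 := by split <;> omega
    have h2 : (if a = b then 1 else 0) ≤ 1 := by split <;> omega
    omega
  · subst heq
    have h1 : ¬ (a = a + a) := by omega
    simp [h1]
    omega

def check_fibonacci_numbers_alt (numbers : List Int) : List String :=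
  match PySem.List.max? numbers (fun x => x) with
  | none => []   -- numbers is empty
  | some m =>
    let fibs := pvSetGo 1 1 m (PySem.Set.ofList [(0 : Int)])
    numbers.map (fun n => if PySem.Set.contains fibs n then pvYes n else pvNo n)

-- ===== PRECONDITION & SPEC =====
def Spec_check_fibonacci_numbers (numbers : List Int) (out : List String) : Prop := out = check_fibonacci_numbers_alt numbers
instance (numbers : List Int) (out : List String) : Decidable (Spec_check_fibonacci_numbers numbers out) := by unfold Spec_check_fibonacci_numbers; infer_instance

-- ===== CLAIM (what is proved, stated in full; the proofs are below) =====
def Claim_equal_check_fibonacci_numbers : Prop := ∀ (numbers : List Int), Dom_check_fibonacci_numbers numbers → Spec_check_fibonacci_numbers numbers (check_fibonacci_numbers numbers)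

-- ===== LEMMAS AND PROOFS =====

-- the b-components produced after the pair (a,b): a+b, a+2b, 2a+3b, …
def pvChain (a b : Nat) : Nat → Nat
  | 0 => a + b
  | j + 1 => pvChain b (a + b) j

-- both programs recognise exactly these integers (0, 1, and the chain from (1,1))
def pvIsFib (n : Int) : Prop := n = 0 ∨ n = 1 ∨ ∃ j, n = ((pvChain 1 1 j : Nat) : Int)

lemma le_pvChain (j : Nat) : ∀ a b : Nat, b ≤ pvChain a b j := by
  induction j with
  | zero => intro a b; simp [pvChain]
  | succ j ih => intro a b; calc b ≤ a + b := by omega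
                                _ ≤ pvChain b (a + b) j := ih b (a + b)
                                _ = pvChain a b (j + 1) := rfl

lemma mem_pvFibGo (a b : Nat) (limit : Int) (acc : List Int) (n : Int)
    (hab : a ≤ b) (hnl : n < limit) :
    (n ∈ pvFibGo a b limit acc ↔
      n ∈ acc ∨ (0 < a ∧ ∃ j, n = ((pvChain a b j : Nat) : Int))) := by
  fun_induction pvFibGo a b limit acc with
  | case1 a b acc h ih =>
    obtain ⟨ha, hb⟩ := h
    rw [ih (by omega)]
    simp only [List.mem_append, List.mem_singleton]
    constructor
    · rintro ((hacc | hval) | ⟨hb', j, hj⟩)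
      · exact Or.inl hacc
      · exact Or.inr ⟨ha, 0, hval⟩
      · exact Or.inr ⟨ha, j + 1, hj⟩
    · rintro (hacc | ⟨_, j, hj⟩)
      · exact Or.inl (Or.inl hacc)
      · cases j with
        | zero => exact Or.inl (Or.inr hj)
        | succ j => exact Or.inr ⟨by omega, j, hj⟩
  | case2 a b acc h =>
    constructor
    · intro hn; exact Or.inl hn
    · rintro (hn | ⟨ha, j, hj⟩)
      · exact hn
      · exfalso
        have hbl : limit ≤ (b : Int) := by
          by_contra hc; exact h ⟨ha, by omega⟩
        have := le_pvChain j a b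
        have : (b : Int) ≤ ((pvChain a b j : Nat) : Int) := by exact_mod_cast this
        omega

lemma is_fib_iff (n : Int) : is_fibonacci_number n = true ↔ pvIsFib n := by
  unfold is_fibonacci_number fibonacci_sequence
  by_cases hneg : n < 0
  · simp only [if_pos hneg]
    constructor
    · intro h; exact absurd h (by simp)
    · rintro (h | h | ⟨j, hj⟩)
      · omega
      · omega
      · have : (0 : Int) ≤ ((pvChain 1 1 j : Nat) : Int) := Int.natCast_nonneg _
        omega
  · simp only [if_neg hneg]
    by_cases h1 : 1 < n + 1
    · rw [if_pos h1, List.contains_iff_mem,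
        mem_pvFibGo 1 1 (n + 1) [0, 1, 1] n (le_refl 1) (by omega)]
      unfold pvIsFib
      simp only [List.mem_cons, List.not_mem_nil]
      constructor
      · rintro ((h | h | h | h) | ⟨_, j, hj⟩)
        · exact Or.inl h
        · exact Or.inr (Or.inl h)
        · exact Or.inr (Or.inl h)
        · exact absurd h (by simp)
        · exact Or.inr (Or.inr ⟨j, hj⟩)
      · rintro (h | h | ⟨j, hj⟩)
        · exact Or.inl (Or.inl h)
        · exact Or.inl (Or.inr (Or.inl h))
        · exact Or.inr ⟨by omega, j, hj⟩
    · -- n = 0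
      have hn0 : n = 0 := by omega
      subst hn0
      rw [if_neg h1]
      simp [pvIsFib]

lemma mem_pvSetGo (a b : Nat) (m : Int) (s : PySem.Set Int) (n : Int)
    (ha : 0 < a) (hab : a ≤ b) (hnm : n ≤ m) :
    (n ∈ pvSetGo a b m s ↔
      n ∈ s ∨ n = (a : Int) ∨ n = (b : Int) ∨ ∃ j, n = ((pvChain a b j : Nat) : Int)) := by
  fun_induction pvSetGo a b m s with
  | case1 a b s h ih =>
    obtain ⟨ha', hab', _⟩ := h
    rw [ih (by omega) (by omega)]
    rw [PySem.Set.mem_add]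
    constructor
    · rintro ((hs | hval) | hb | hab2 | ⟨j, hj⟩)
      · exact Or.inl hs
      · exact Or.inr (Or.inl hval)
      · exact Or.inr (Or.inr (Or.inl hb))
      · exact Or.inr (Or.inr (Or.inr ⟨0, by exact_mod_cast hab2⟩))
      · exact Or.inr (Or.inr (Or.inr ⟨j + 1, hj⟩))
    · rintro (hs | hA | hB | ⟨j, hj⟩)
      · exact Or.inl (Or.inl hs)
      · exact Or.inl (Or.inr hA)
      · exact Or.inr (Or.inl hB)
      · cases j with
        | zero => exact Or.inr (Or.inr (Or.inl (by exact_mod_cast hj)))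
        | succ j => exact Or.inr (Or.inr (Or.inr ⟨j, hj⟩))
  | case2 a b s h =>
    have hma : m < (a : Int) := by
      by_contra hc; exact h ⟨ha, hab, by omega⟩
    constructor
    · intro hn; exact Or.inl hn
    · rintro (hs | hA | hB | ⟨j, hj⟩)
      · exact hs
      · omega
      · have : (a : Int) ≤ (b : Int) := by exact_mod_cast hab
        omega
      · exfalso
        have h1 := le_pvChain j a b
        have h2 : (b : Int) ≤ ((pvChain a b j : Nat) : Int) := by exact_mod_cast h1
        have : (a : Int) ≤ (b : Int) := by exact_mod_cast hab
        omega

lemma set_mem_iff (m n : Int) (hnm : n ≤ m) :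
    PySem.Set.contains (pvSetGo 1 1 m (PySem.Set.ofList [(0 : Int)])) n = true ↔ pvIsFib n := by
  rw [PySem.Set.contains_iff,
    mem_pvSetGo 1 1 m _ n (by omega) (le_refl 1) hnm]
  unfold pvIsFib
  constructor
  · rintro (hs | h | h | h)
    · left; simpa [PySem.Set.ofList] using hs
    · exact Or.inr (Or.inl h)
    · exact Or.inr (Or.inl h)
    · exact Or.inr (Or.inr h)
  · rintro (h | h | h)
    · left; simp [PySem.Set.ofList, h]
    · exact Or.inr (Or.inl h)
    · exact Or.inr (Or.inr (Or.inr h))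

-- ===== VERDICT (by name: the statement is the Claim_ definition above) =====
theorem check_fibonacci_numbers_spec : Claim_equal_check_fibonacci_numbers := by
  intro numbers _
  unfold Spec_check_fibonacci_numbers check_fibonacci_numbers check_fibonacci_numbers_alt
  rw [PySem.List.foldl_append_singleton_eq_map]
  cases hmax : PySem.List.max? numbers (fun x => x) with
  | none =>
    rw [PySem.List.max?_eq_none_iff] at hmax
    subst hmax; rfl
  | some m =>
    simp only []
    apply List.map_congr_left
    intro n hn
    have hnm : n ≤ m := PySem.List.max?_isMax hmax n hn
    have : is_fibonacci_number n =
        PySem.Set.contains (pvSetGo 1 1 m (PySem.Set.ofList [(0 : Int)])) n := by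
      rw [Bool.eq_iff_iff, is_fib_iff, set_mem_iff m n hnm]
    rw [this]
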